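-- pv_equiv track=rewrite | github.com/bharat007-commits/leet_code_pratice | NextGreaterElement.py | ciruclarNextGreaterElement
-- ===== SOURCE A (Python) =====
-- from typing import List
--
-- def ciruclarNextGreaterElement(nums:List[int])-> List[int]:
--     n=len(nums)
--     st=[]
--     nge =[-1]*n
--     for i in range(2*n-1,-1,-1):
--         while st and st[-1]<= nums[i%n]:
--             st.pop()
--
--         if i<n :
--             if st:
--                 nge[i]=st[-1]
--         st.append(nums[i%n])
--     return nge
-- ===== SOURCE B (Python) =====
-- from typing import List
--
-- def ciruclarNextGreaterElement(nums: List[int]) -> List[int]: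
--     n = len(nums)
--
--     def first_greater(i):
--         x = nums[i]
--         for j in range(1, n):
--             cand = nums[(i + j) % n]
--             if cand > x:
--                 return cand
--         return -1
--
--     return [first_greater(i) for i in range(n)]
-- ===== Notes on version B (the rewrite author's own statement) =====
-- stated objective: simpler
-- what changed: Replaces the monotonic-stack pass over the doubled reversed index range with a direct naive scan: for each position, walk the next n-1 circular positions and return the first strictly greater value (default -1).
import Mathlib
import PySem

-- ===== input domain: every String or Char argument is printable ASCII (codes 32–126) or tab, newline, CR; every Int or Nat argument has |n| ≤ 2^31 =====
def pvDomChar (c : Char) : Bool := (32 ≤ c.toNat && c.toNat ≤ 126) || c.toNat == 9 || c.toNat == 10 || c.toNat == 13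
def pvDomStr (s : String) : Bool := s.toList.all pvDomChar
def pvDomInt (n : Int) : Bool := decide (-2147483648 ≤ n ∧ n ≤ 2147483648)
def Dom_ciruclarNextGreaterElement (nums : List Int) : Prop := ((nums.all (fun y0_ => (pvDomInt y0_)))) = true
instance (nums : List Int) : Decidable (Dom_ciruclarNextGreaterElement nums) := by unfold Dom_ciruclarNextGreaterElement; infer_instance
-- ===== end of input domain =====

-- B replaces A's monotonic-stack pass over the doubled index range by a direct
-- circular scan for each position (objective: simpler; not faster).

-- ===== PORT A =====
-- loop body of A's `for i in range(2*n-1,-1,-1)`; the stack is kept head-first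
-- (head = Python's st[-1]), so the `while … pop` loop is a dropWhile from the head.
def pvStepA (nums : List Int) (n : Nat) (state : List Int × List Int) (i : Nat) :
    List Int × List Int :=
  let v := nums.getD (i % n) 0                      -- nums[i % n]; i % n is always in range
  let st := state.1.dropWhile (fun t => decide (t ≤ v))
  let nge := if i < n then
               (match st with
                | [] => state.2
                | t :: _ => state.2.set i t)        -- nge[i] = st[-1]
             else state.2
  (v :: st, nge)                                    -- st.append(nums[i % n])

def ciruclarNextGreaterElement (nums : List Int) : List Int :=
  let n := nums.length
  -- range(2*n-1, -1, -1) = the indices 0..2n-1 in reverse order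
  ((List.range (2*n)).reverse.foldl (pvStepA nums n) ([], List.replicate n (-1))).2

-- ===== PORT B =====
-- `first_greater`'s for-loop over j in range(1, n), returning on the first hit
def pvFirstGreater (nums : List Int) (n : Nat) (x : Int) (i : Nat) : List Nat → Int
  | [] => -1
  | j :: js =>
      let cand := nums.getD ((i + j) % n) 0         -- nums[(i + j) % n]
      if x < cand then cand else pvFirstGreater nums n x i js

def ciruclarNextGreaterElement_alt (nums : List Int) : List Int :=
  let n := nums.length
  (List.range n).map (fun i =>
    pvFirstGreater nums n (nums.getD i 0) i (List.range' 1 (n - 1)))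

-- ===== PRECONDITION & SPEC =====
def Spec_ciruclarNextGreaterElement (nums : List Int) (out : List Int) : Prop := out = ciruclarNextGreaterElement_alt nums
instance (nums : List Int) (out : List Int) : Decidable (Spec_ciruclarNextGreaterElement nums out) := by unfold Spec_ciruclarNextGreaterElement; infer_instance

-- ===== CLAIM (what is proved, stated in full; the proofs are below) =====
def Claim_equal_ciruclarNextGreaterElement : Prop := ∀ (nums : List Int), Dom_ciruclarNextGreaterElement nums → Spec_ciruclarNextGreaterElement nums (ciruclarNextGreaterElement nums)

-- ===== LEMMAS AND PROOFS =====

-- value at circular position k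
def pvV (nums : List Int) (k : Nat) : Int := nums.getD (k % nums.length) 0

-- first circular value strictly greater than w among positions i, i+1, …, i+m-1
def pvF (nums : List Int) (w : Int) : Nat → Nat → Option Int
  | _, 0 => none
  | i, m+1 => if w < pvV nums i then some (pvV nums i) else pvF nums w (i+1) m

theorem pvV_period (nums : List Int) (k : Nat) :
    pvV nums (k + nums.length) = pvV nums k := by
  simp [pvV, Nat.add_mod_right]

theorem dropWhile_dropWhile (l : List Int) (a b : Int) (hab : a ≤ b) :
    (l.dropWhile (fun t => decide (t ≤ a))).dropWhile (fun t => decide (t ≤ b))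
      = l.dropWhile (fun t => decide (t ≤ b)) := by
  induction l with
  | nil => rfl
  | cons x xs ih =>
    by_cases hx : x ≤ a
    · have hxb : x ≤ b := le_trans hx hab
      simp [List.dropWhile, hx, hxb, ih]
    · simp [List.dropWhile, hx]

theorem set_map_range (n i : Nat) (f : Nat → Int) (t : Int) :
    ((List.range n).map f).set i t
      = (List.range n).map (fun k => if k = i then t else f k) := by
  apply List.ext_getElem
  · simp
  · intro j h1 h2
    simp only [List.length_map, List.length_range] at h1 h2
    simp only [List.getElem_set, List.getElem_map, List.getElem_range]
    rcases eq_or_ne i j with h | h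
    · subst h; simp
    · simp [h, Ne.symm h]

theorem pvF_none_iff (nums : List Int) (w : Int) (m : Nat) : ∀ i,
    pvF nums w i m = none ↔ ∀ j < m, ¬ w < pvV nums (i + j) := by
  induction m with
  | zero => intro i; simp [pvF]
  | succ m ih =>
    intro i
    by_cases h : w < pvV nums i
    · simp only [pvF, if_pos h]
      constructor
      · intro hc; exact absurd hc (by simp)
      · intro hall; exact absurd h (by simpa using hall 0 (by omega))
    · simp only [pvF, if_neg h]
      rw [ih (i+1)]
      constructor
      · intro hall j hj
        match j, hj with
        | 0, _ => simpa using h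
        | j+1, hj => have := hall j (by omega); simpa [Nat.add_assoc, Nat.add_comm 1 j] using this
      · intro hall j hj
        have := hall (j+1) (by omega)
        simpa [Nat.add_assoc, Nat.add_comm 1 j] using this

theorem pvF_append (nums : List Int) (w : Int) (m1 : Nat) : ∀ i m2,
    pvF nums w i (m1 + m2)
      = (match pvF nums w i m1 with
         | some t => some t
         | none => pvF nums w (i + m1) m2) := by
  induction m1 with
  | zero => intro i m2; simp [pvF]
  | succ m1 ih =>
    intro i m2
    by_cases h : w < pvV nums i
    · simp [pvF, Nat.succ_add, h]
    · simp only [Nat.succ_add, pvF, if_neg h, ih (i+1) m2]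
      simp only [Nat.succ_eq_add_one,
        show i + (m1 + 1) = i + m1 + 1 from by omega]

-- B's inner loop computes pvF
theorem firstGreater_eq_pvF (nums : List Int) (x : Int) (m : Nat) : ∀ i j,
    pvFirstGreater nums nums.length x i (List.range' j m)
      = (pvF nums x (i + j) m).getD (-1) := by
  induction m with
  | zero => intro i j; simp [pvFirstGreater, pvF]
  | succ m ih =>
    intro i j
    rw [List.range'_succ]
    simp only [pvFirstGreater, pvF]
    rw [show nums.getD ((i + j) % nums.length) 0 = pvV nums (i + j) from rfl]
    by_cases h : x < pvV nums (i + j)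
    · simp [h]
    · simp only [if_neg h, ih i (j+1), show i + (j+1) = i + j + 1 from by omega]

-- the main invariant of A's fold, for the last m indices (i.e. indices ≥ 2n−m):
-- (1) the stack answers "first value > w among the processed positions",
-- (2) nge holds the final answers at the already-processed positions < n
theorem pvInvA (nums : List Int) (m : Nat) (hm : m ≤ 2 * nums.length) :
    (∀ w, (((List.range' (2*nums.length - m) m).foldr
              (fun i acc => pvStepA nums nums.length acc i)
              ([], List.replicate nums.length (-1))).1.dropWhile
              (fun t => decide (t ≤ w))).head? = pvF nums w (2*nums.length - m) m)
    ∧ ((List.range' (2*nums.length - m) m).foldr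
              (fun i acc => pvStepA nums nums.length acc i)
              ([], List.replicate nums.length (-1))).2
        = (List.range nums.length).map (fun k =>
            if 2*nums.length - m ≤ k then (pvF nums (pvV nums k) (k+1) (2*nums.length - (k+1))).getD (-1)
            else -1) := by
  induction m with
  | zero =>
    refine ⟨fun w => by simp [pvF], ?_⟩
    simp only [List.range'_zero, List.foldr_nil]
    rw [List.map_congr_left (g := fun _ => (-1 : Int)) (fun k hk => by
      simp only [List.mem_range] at hk
      rw [if_neg (by omega)])]
    simp [List.map_const']
  | succ m ih =>
    have hm' : m ≤ 2*nums.length := by omega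
    obtain ⟨ih1, ih2⟩ := ih hm'
    have hidx : List.range' (2*nums.length - (m+1)) (m+1)
        = (2*nums.length - (m+1)) :: List.range' (2*nums.length - m) m := by
      rw [List.range'_succ, show 2*nums.length - (m+1) + 1 = 2*nums.length - m from by omega]
    rw [hidx, List.foldr_cons]
    set i := 2*nums.length - (m+1) with hi
    set R := (List.range' (2*nums.length - m) m).foldr
              (fun i acc => pvStepA nums nums.length acc i)
              ([], List.replicate nums.length (-1)) with hR
    have hvi : nums.getD (i % nums.length) 0 = pvV nums i := rfl
    have him : i + 1 = 2*nums.length - m := by omega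
    constructor
    · -- stack clause
      intro w
      simp only [pvStepA, hvi]
      by_cases hw : w < pvV nums i
      · rw [List.dropWhile_cons_of_neg (by simpa using not_le.mpr hw)]
        simp [pvF, hw]
      · rw [List.dropWhile_cons_of_pos (by simpa using not_lt.mp hw),
            dropWhile_dropWhile _ _ _ (not_lt.mp hw), ih1 w]
        simp only [pvF, if_neg hw]
        rw [him]
    · -- nge clause
      simp only [pvStepA, hvi]
      by_cases hin : i < nums.length
      · rw [if_pos hin]
        have hm2 : m = 2*nums.length - (i+1) := by omega
        have hhead := ih1 (pvV nums i)
        rw [← him] at hhead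
        cases hst : R.1.dropWhile (fun t => decide (t ≤ pvV nums i)) with
        | nil =>
          rw [hst] at hhead
          dsimp only
          rw [ih2]
          refine List.map_congr_left (fun k hk => ?_)
          simp only [List.mem_range] at hk
          rcases eq_or_ne k i with h | h
          · subst h
            rw [if_neg (by omega), if_pos (le_refl _), ← hm2, ← hhead]
            rfl
          · rcases Nat.lt_or_ge k i with h2 | h2
            · rw [if_neg (by omega), if_neg (by omega)]
            · rw [if_pos (by omega), if_pos (by omega)]
        | cons t rest =>
          rw [hst] at hhead
          dsimp only
          rw [ih2, set_map_range]
          refine List.map_congr_left (fun k hk => ?_)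
          simp only [List.mem_range] at hk
          rcases eq_or_ne k i with h | h
          · subst h
            rw [if_pos rfl, if_pos (le_refl _), ← hm2, ← hhead]
            rfl
          · rw [if_neg h]
            rcases Nat.lt_or_ge k i with h2 | h2
            · rw [if_neg (by omega), if_neg (by omega)]
            · rw [if_pos (by omega), if_pos (by omega)]
      · rw [if_neg hin, ih2]
        refine List.map_congr_left (fun k hk => ?_)
        simp only [List.mem_range] at hk
        rw [if_neg (by omega), if_neg (by omega)]

theorem ciruclarNextGreaterElement_eq (nums : List Int) :
    ciruclarNextGreaterElement nums = ciruclarNextGreaterElement_alt nums := by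
  have h2n : 2*nums.length - 2*nums.length = 0 := by omega
  obtain ⟨-, h⟩ := pvInvA nums (2*nums.length) (le_refl _)
  rw [h2n] at h
  simp only [ciruclarNextGreaterElement, ciruclarNextGreaterElement_alt,
    List.foldl_reverse]
  rw [show List.range (2*nums.length) = List.range' 0 (2*nums.length) from List.range_eq_range', h]
  refine List.map_congr_left (fun k hk => ?_)
  simp only [List.mem_range] at hk
  rw [if_pos (Nat.zero_le k)]
  have hvk : nums.getD k 0 = pvV nums k := by
    simp [pvV, Nat.mod_eq_of_lt hk]
  rw [firstGreater_eq_pvF, hvk]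
  -- it remains to cut the tail: positions k+n … 2n−1 repeat already-scanned values
  have hsplit : 2*nums.length - (k+1) = (nums.length - 1) + (nums.length - k) := by omega
  rw [hsplit, pvF_append]
  cases hfst : pvF nums (pvV nums k) (k+1) (nums.length - 1) with
  | some t => simp
  | none =>
    simp only
    rw [show k + 1 + (nums.length - 1) = k + nums.length from by omega]
    have hnone : pvF nums (pvV nums k) (k + nums.length) (nums.length - k) = none := by
      rw [pvF_none_iff]
      intro j hj
      rw [show k + nums.length + j = (k + j) + nums.length from by omega, pvV_period]
      rcases Nat.eq_zero_or_pos j with h0 | hpos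
      · subst h0; simp
      · have := (pvF_none_iff nums (pvV nums k) (nums.length - 1) (k+1)).mp hfst
          (j - 1) (by omega)
        rw [show k + 1 + (j-1) = k + j from by omega] at this
        exact this
    rw [hnone]

-- ===== VERDICT (by name: the statement is the Claim_ definition above) =====
theorem ciruclarNextGreaterElement_spec : Claim_equal_ciruclarNextGreaterElement := by
  intro nums _
  exact ciruclarNextGreaterElement_eq nums
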